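-- pv_equiv track=rewrite | github.com/johnsmithm/ner-accidente | scripts/nlp/pptext.py | split_and_save_to_new_column
-- ===== SOURCE A (Python) =====
-- def change_to_training_format(passed_data):
--     last_len = 0
--     position = []
--     entities = []
--
--     for i in passed_data:
--         i_processed = i.replace("||","")
--         if "|" in i:
--             start = last_len
--             finish = last_len + len(i_processed)
--             last_len += len(i_processed) + 1
--
--             entities.append((start, finish, 'LOC_ACCIDENT'))
--             position.append(start)
--             position.append(finish)
--         else:
--             last_len += len(i_processed) + 1
--     return entities
--
-- def split_and_save_to_new_column(df_column):
-- # this dict will be populated with "entities_positions_dict" for each row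
--     holding_dict = {}
--     row_index = 0
--     for row in df_column:
--         # all the enteties per row will be held in this dic
--         entities_positions_dict = {}
--
--         split = row.split(" ")
--
--         #Data cleaning some symbols
--         cleaned_data_no_bars = row
--         cleaned_data_no_bars = cleaned_data_no_bars.replace('||', " ")
--         cleaned_data_no_bars = cleaned_data_no_bars.replace('   ', " ")
--         cleaned_data_no_bars = cleaned_data_no_bars.replace('  ', " ")
--
--         entities_position = change_to_training_format(split)
--         # Append
--         entities_positions_dict['entities'] = entities_position
--         holding_dict[row_index] = entities_positions_dict
--         row_index +=1
--     return holding_dict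
-- ===== SOURCE B (Python) =====
-- def split_and_save_to_new_column(df_column):
--     # one character-level state-machine scan per row: no split(), no replace();
--     # ' ' closes a token, a '||' pair vanishes, a lone '|' counts one char
--     return {i: {'entities': _row_entities(row)} for i, row in enumerate(df_column)}
--
-- def _row_entities(row):
--     ents = []
--     pos = 0        # offset in the processed ('||'-free) text
--     start = 0      # processed offset where the current token began
--     has_bar = False
--     i = 0
--     n = len(row)
--     while i < n:
--         c = row[i]
--         if c == ' ':
--             if has_bar:
--                 ents.append((start, pos, 'LOC_ACCIDENT'))
--             pos += 1
--             start = pos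
--             has_bar = False
--             i += 1
--         elif c == '|':
--             has_bar = True
--             if i + 1 < n and row[i + 1] == '|':
--                 i += 2          # a '||' pair is removed entirely
--             else:
--                 pos += 1
--                 i += 1
--         else:
--             pos += 1
--             i += 1
--     if has_bar:
--         ents.append((start, pos, 'LOC_ACCIDENT'))
--     return ents
-- ===== Notes on version B (the rewrite author's own statement) =====
-- stated objective: alternative
-- what changed: Replaces A's token pipeline (row.split(' '), per-token '||' replace, running length accumulator, dead cleaned_data_no_bars replaces) with a single character-level state machine per row that never splits or replaces: it walks the raw characters once, skipping '||' pairs, counting processed offsets, and emitting a span when a bar-containing token is closed by a space or the end of the row.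
import Mathlib
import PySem

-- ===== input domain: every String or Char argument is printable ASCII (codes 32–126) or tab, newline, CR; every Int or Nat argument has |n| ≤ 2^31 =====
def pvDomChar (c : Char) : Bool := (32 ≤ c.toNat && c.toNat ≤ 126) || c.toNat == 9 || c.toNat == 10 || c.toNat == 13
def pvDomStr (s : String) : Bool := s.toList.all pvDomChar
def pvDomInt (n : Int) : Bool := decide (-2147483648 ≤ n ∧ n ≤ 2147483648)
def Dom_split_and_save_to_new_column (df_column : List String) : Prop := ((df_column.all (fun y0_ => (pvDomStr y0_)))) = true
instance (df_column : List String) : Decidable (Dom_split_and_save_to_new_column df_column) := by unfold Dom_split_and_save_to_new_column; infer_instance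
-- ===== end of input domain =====

-- B replaces A's token pipeline (split, per-token '||' replace, running length accumulator)
-- with a single character-level state-machine scan per row (alternative decomposition).

-- ===== PORT A =====
-- loop body of change_to_training_format (state = (last_len, position, entities))
def pvStepA (st : Int × List Int × List (Int × Int × String)) (i : String) :
    Int × List Int × List (Int × Int × String) :=
  let i_processed := PySem.Str.replace i "||" ""
  if PySem.Str.isIn "|" i then
    let start := st.1
    let finish := st.1 + PySem.Str.len i_processed
    (st.1 + PySem.Str.len i_processed + 1,
     st.2.1 ++ [start, finish],
     st.2.2 ++ [(start, finish, "LOC_ACCIDENT")])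
  else
    (st.1 + PySem.Str.len i_processed + 1, st.2.1, st.2.2)

def change_to_training_format (passed_data : List String) :
    List (Int × Int × String) :=
  (passed_data.foldl pvStepA (0, [], [])).2.2

-- loop body of split_and_save_to_new_column (state = (holding_dict, row_index))
def pvStepRow
    (st : PySem.Dict Int (List (String × List (Int × Int × String))) × Int)
    (row : String) :
    PySem.Dict Int (List (String × List (Int × Int × String))) × Int :=
  let split := (PySem.Str.split? row " ").getD []
  let cleaned_data_no_bars := row
  let cleaned_data_no_bars := PySem.Str.replace cleaned_data_no_bars "||" " "
  let cleaned_data_no_bars := PySem.Str.replace cleaned_data_no_bars "   " " "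
  let _ := PySem.Str.replace cleaned_data_no_bars "  " " "
  let entities_position := change_to_training_format split
  let entities_positions_dict :=
    ((PySem.Dict.empty : PySem.Dict String (List (Int × Int × String))).insert
      "entities" entities_position).items
  (st.1.insert st.2 entities_positions_dict, st.2 + 1)

def split_and_save_to_new_column (df_column : List String) :
    List (Int × List (String × List (Int × Int × String))) :=
  (df_column.foldl pvStepRow
    ((PySem.Dict.empty : PySem.Dict Int (List (String × List (Int × Int × String)))), 0)).1.items

-- ===== PORT B =====
-- the while-loop of _row_entities: recursion over the remaining characters carries
-- exactly the loop state (pos, start, has_bar, ents); the i+2 skip of a '||' pair is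
-- the two-character pattern
def pvScan : List Char → Int → Int → Bool → List (Int × Int × String) → List (Int × Int × String)
  | [], pos, start, hb, ents =>
      ents ++ (if hb then [(start, pos, "LOC_ACCIDENT")] else [])
  | ' ' :: rest, pos, start, hb, ents =>
      pvScan rest (pos + 1) (pos + 1) false
        (ents ++ (if hb then [(start, pos, "LOC_ACCIDENT")] else []))
  | '|' :: '|' :: rest2, pos, start, _hb, ents =>
      pvScan rest2 pos start true ents
  | '|' :: rest, pos, start, _hb, ents =>
      pvScan rest (pos + 1) start true ents
  | _ :: rest, pos, start, hb, ents =>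
      pvScan rest (pos + 1) start hb ents

-- dict comprehension over enumerate: keys 0,1,2,… are fresh, so the dict's items are
-- exactly this list in insertion order
def split_and_save_to_new_column_alt (df_column : List String) :
    List (Int × List (String × List (Int × Int × String))) :=
  (PySem.List.enumerate df_column 0).map (fun p =>
    (p.1, [("entities", pvScan p.2.toList 0 0 false [])]))

-- ===== PRECONDITION & SPEC =====
def Spec_split_and_save_to_new_column (df_column : List String) (out : List (Int × List (String × List (Int × Int × String)))) : Prop := out = split_and_save_to_new_column_alt df_column
instance (df_column : List String) (out : List (Int × List (String × List (Int × Int × String)))) : Decidable (Spec_split_and_save_to_new_column df_column out) := by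
  unfold Spec_split_and_save_to_new_column
  haveI : DecidableEq (List (Int × Int × String)) := inferInstance
  haveI : DecidableEq (List (String × List (Int × Int × String))) := inferInstance
  haveI : DecidableEq (Int × List (String × List (Int × Int × String))) := inferInstance
  infer_instance

-- ===== CLAIM (what is proved, stated in full; the proofs are below) =====
def Claim_equal_split_and_save_to_new_column : Prop := ∀ (df_column : List String), Dom_split_and_save_to_new_column df_column → Spec_split_and_save_to_new_column df_column (split_and_save_to_new_column df_column)

-- ===== LEMMAS AND PROOFS =====

-- the processed length of a token
def pvLp (t : String) : Int := PySem.Str.len (PySem.Str.replace t "||" "")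

-- the entity list of one row's tokens, starting from base offset b (A's view)
def pvEnt (b : Int) : List String → List (Int × Int × String)
  | [] => []
  | t :: ts =>
      (if PySem.Str.isIn "|" t then [(b, b + pvLp t, "LOC_ACCIDENT")] else []) ++
      pvEnt (b + pvLp t + 1) ts

theorem pvLp_def (t : String) : PySem.Str.len (PySem.Str.replace t "||" "") = pvLp t := rfl

-- A's inner fold appends pvEnt
theorem pvA_fold (ts : List String) (st : Int × List Int × List (Int × Int × String)) :
    (ts.foldl pvStepA st).2.2 = st.2.2 ++ pvEnt st.1 ts := by
  induction ts generalizing st with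
  | nil => simp [pvEnt]
  | cons t ts ih =>
      rw [List.foldl_cons, ih]
      by_cases h : PySem.Chars.isIn ['|'] t.toList <;>
        simp [pvStepA, pvEnt, pvLp, h]

theorem pvA_inner (ts : List String) :
    change_to_training_format ts = pvEnt 0 ts := by
  simpa [change_to_training_format] using pvA_fold ts (0, [], [])

-- the value both programs assign to one row
def pvRowVal (row : String) : List (String × List (Int × Int × String)) :=
  [("entities", pvEnt 0 ((PySem.Str.split? row " ").getD []))]

-- A's outer fold builds exactly the enumerated row values
theorem pvA_outer (rows : List String)
    (d : PySem.Dict Int (List (String × List (Int × Int × String)))) (k : Int)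
    (hk : ∀ j ∈ d.keys, j < k) :
    (rows.foldl pvStepRow (d, k)).1.items
      = d.items ++ (PySem.List.enumerate rows k).map (fun p => (p.1, pvRowVal p.2)) := by
  induction rows generalizing d k with
  | nil => simp [PySem.List.enumerate_nil]
  | cons r rs ih =>
      have hc : d.contains k = false := by
        rw [PySem.Dict.contains_eq_decide_mem_keys]
        simp only [decide_eq_false_iff_not]
        intro hmem
        exact absurd rfl (Int.ne_of_lt (hk k hmem))
      have hstep : pvStepRow (d, k) r =
          (d.insert k (((PySem.Dict.empty :
              PySem.Dict String (List (Int × Int × String))).insert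
            "entities" (change_to_training_format
              ((PySem.Str.split? r " ").getD []))).items), k + 1) := rfl
      rw [List.foldl_cons, hstep,
        ih _ (k + 1) (by
          intro j hj
          rw [PySem.Dict.keys_insert_of_not_contains _ _ hc] at hj
          rcases List.mem_append.mp hj with h | h
          · exact lt_trans (hk j h) (by omega)
          · simp at h; omega)]
      rw [PySem.Dict.items_insert_of_not_contains _ _ hc]
      simp [PySem.List.enumerate_cons, pvA_inner, pvRowVal,
        PySem.Dict.items_insert_of_not_contains, PySem.Dict.empty]

-- '||'-removal, in exactly the shape of PySem.Chars.replace.go's recursion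
def remBars : List Char → List Char
  | [] => []
  | c :: t =>
      if (['|', '|'] : List Char).isPrefixOf (c :: t) then remBars (t.drop 1)
      else c :: remBars t
  termination_by l => l.length
  decreasing_by
    · simp only [List.length_drop, List.length_cons]; omega
    · simp

theorem pvReplaceGo (fuel : Nat) (l acc : List Char) (h : l.length ≤ fuel) :
    PySem.Chars.replace.go ['|', '|'] [] fuel l acc = acc.reverse ++ remBars l := by
  induction fuel generalizing l acc with
  | zero =>
      have : l = [] := List.eq_nil_of_length_eq_zero (Nat.le_zero.mp h)
      subst this
      rw [PySem.Chars.replace.go.eq_def]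
      simp [remBars]
  | succ fuel ih =>
      cases l with
      | nil => rw [PySem.Chars.replace.go.eq_def]; simp [remBars]
      | cons c t =>
          rw [PySem.Chars.replace.go.eq_def]
          simp only []
          by_cases hp : (['|', '|'] : List Char).isPrefixOf (c :: t)
          · rw [if_pos hp]
            have hd : List.drop (['|', '|'] : List Char).length (c :: t) = t.drop 1 := by
              simp
            simp only [List.reverse_nil, List.nil_append]
            rw [hd, ih (t.drop 1) acc (by simp at h ⊢; omega)]
            rw [remBars, if_pos hp]
          · rw [if_neg hp, ih t (c :: acc) (by simp at h ⊢; omega)]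
            rw [remBars, if_neg hp]
            simp

theorem pvReplace (cs : List Char) :
    PySem.Chars.replace cs ['|', '|'] [] = remBars cs := by
  rw [PySem.Chars.replace]
  simp only [List.isEmpty_cons, if_false, Bool.false_eq_true]
  simpa using pvReplaceGo cs.length cs [] le_rfl

-- splitting on a single space, as a plain recursion carrying the current token
def splitSp (pre : List Char) : List Char → List (List Char)
  | [] => [pre]
  | c :: t => if c = ' ' then pre :: splitSp [] t else splitSp (pre ++ [c]) t

theorem pvSplitGo (fuel : Nat) (l cur : List Char) (acc : List (List Char))
    (h : l.length ≤ fuel) :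
    PySem.Chars.splitOn.go [' '] fuel l cur acc = acc.reverse ++ splitSp cur.reverse l := by
  induction fuel generalizing l cur acc with
  | zero =>
      have : l = [] := List.eq_nil_of_length_eq_zero (Nat.le_zero.mp h)
      subst this
      rw [PySem.Chars.splitOn.go.eq_def]
      simp [splitSp]
  | succ fuel ih =>
      cases l with
      | nil => rw [PySem.Chars.splitOn.go.eq_def]; simp [splitSp]
      | cons c t =>
          rw [PySem.Chars.splitOn.go.eq_def]
          simp only []
          by_cases hc : c = ' '
          · have hp : ([' '] : List Char).isPrefixOf (c :: t) = true := by
              simp [List.isPrefixOf, hc]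
            rw [if_pos hp]
            have hd : List.drop ([' '] : List Char).length (c :: t) = t := by simp
            rw [hd, ih t [] (cur.reverse :: acc) (by simp at h ⊢; omega)]
            rw [splitSp, if_pos hc]
            simp
          · have hp : ([' '] : List Char).isPrefixOf (c :: t) = false := by
              simp [List.isPrefixOf]
              intro hceq; exact absurd hceq.symm hc
            rw [if_neg (by simp [hp])]
            rw [ih t (c :: cur) acc (by simp at h ⊢; omega)]
            rw [splitSp, if_neg hc]
            simp

theorem pvSplit (cs : List Char) :
    PySem.Chars.splitOn cs [' '] = splitSp [] cs := by
  rw [PySem.Chars.splitOn]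
  simpa using pvSplitGo (cs.length + 1) cs [] [] (by omega)

-- splitSp with a pending prefix = prefix glued onto the head of splitSp [] l
theorem pvSplitSp_pre (l : List Char) (pre : List Char) :
    splitSp pre l = (pre ++ (splitSp [] l).headI) :: (splitSp [] l).tail := by
  induction l generalizing pre with
  | nil => simp [splitSp]
  | cons c t ih =>
      by_cases hc : c = ' '
      · rw [splitSp, if_pos hc]
        conv_rhs => rw [splitSp, if_pos hc]
        simp
      · rw [splitSp, if_neg hc, ih]
        conv_rhs => rw [splitSp, if_neg hc]
        simp only [List.nil_append]
        rw [ih [c]]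
        simp

theorem pvSplitSp_shape (l : List Char) :
    splitSp [] l = (splitSp [] l).headI :: (splitSp [] l).tail := by
  simpa using pvSplitSp_pre l []

-- B's view of the entities, over the char tokens
def pvEntC (b : Int) : List (List Char) → List (Int × Int × String)
  | [] => []
  | t :: ts =>
      (if '|' ∈ t then [(b, b + ((remBars t).length : Int), "LOC_ACCIDENT")] else []) ++
      pvEntC (b + ((remBars t).length : Int) + 1) ts

-- same, with the head token partially consumed (start, processed offset pos, bar flag hb)
def pvEntMid (start pos : Int) (hb : Bool) : List (List Char) → List (Int × Int × String)
  | [] => []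
  | t :: ts =>
      (if hb || '|' ∈ t then [(start, pos + ((remBars t).length : Int), "LOC_ACCIDENT")] else []) ++
      pvEntC (pos + ((remBars t).length : Int) + 1) ts

theorem pvEntMid_start (b : Int) (ts : List (List Char)) :
    pvEntMid b b false ts = pvEntC b ts := by
  cases ts <;> simp [pvEntMid, pvEntC]

-- remBars on a token starting with a '||' pair / a lone bar / an ordinary char
theorem remBars_pair (xs : List Char) : remBars ('|' :: '|' :: xs) = remBars xs := by
  rw [remBars, if_pos (by simp [List.isPrefixOf])]
  simp

theorem remBars_cons_ne (c : Char) (xs : List Char) (h : c ≠ '|') :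
    remBars (c :: xs) = c :: remBars xs := by
  rw [remBars, if_neg]
  simp only [List.isPrefixOf, Bool.and_eq_true, beq_iff_eq]
  intro hp
  exact h hp.1.symm

theorem remBars_bar (xs : List Char) (h : ∀ y ys, xs = y :: ys → y ≠ '|') :
    remBars ('|' :: xs) = '|' :: remBars xs := by
  cases xs with
  | nil =>
      simp [remBars, List.isPrefixOf]
  | cons d ys =>
      have hd : ('|' : Char) ≠ d := fun he => (h d ys rfl) he.symm
      rw [remBars, if_neg]
      simp only [List.isPrefixOf, Bool.and_eq_true, beq_iff_eq]
      intro hp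
      exact hd hp.2.1

-- the scan computes pvEntMid of the space-split of the remaining characters
theorem pvScan_eq (cs : List Char) (pos start : Int) (hb : Bool)
    (ents : List (Int × Int × String)) :
    pvScan cs pos start hb ents = ents ++ pvEntMid start pos hb (splitSp [] cs) := by
  fun_induction pvScan cs pos start hb ents with
  | case1 pos start hb ents =>
      simp [splitSp, pvEntMid, pvEntC, remBars]
  | case2 rest pos start hb ents ih =>
      rw [ih, pvEntMid_start]
      have h1 : splitSp [] (' ' :: rest) = [] :: splitSp [] rest := by
        rw [splitSp, if_pos rfl]
      rw [h1, pvEntMid]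
      simp [remBars, List.append_assoc]
  | case3 rest2 pos start hb ents ih =>
      rw [ih]
      have h1 : splitSp [] ('|' :: '|' :: rest2) = splitSp ['|', '|'] rest2 := by
        rw [splitSp, if_neg (by decide), List.nil_append]
        rw [splitSp, if_neg (by decide)]
        rfl
      rw [h1, pvSplitSp_pre rest2 ['|', '|']]
      conv_lhs => rw [pvSplitSp_shape rest2]
      rw [pvEntMid, pvEntMid]
      simp [remBars_pair]
  | case4 rest pos start hb ents hno ih =>
      rw [ih]
      have hbar : remBars ('|' :: (splitSp [] rest).headI)
          = '|' :: remBars (splitSp [] rest).headI := by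
        apply remBars_bar
        intro y ys hy hyeq
        subst hyeq
        cases rest with
        | nil => simp [splitSp] at hy
        | cons d r2 =>
            by_cases hd : d = ' '
            · subst hd
              have h2 : splitSp [] (' ' :: r2) = [] :: splitSp [] r2 := by
                rw [splitSp, if_pos rfl]
              rw [h2] at hy
              simp at hy
            · rw [splitSp, if_neg hd, List.nil_append, pvSplitSp_pre r2 [d]] at hy
              simp at hy
              exact hno r2 (by rw [hy.1])
      have h1 : splitSp [] ('|' :: rest) = splitSp ['|'] rest := by
        rw [splitSp, if_neg (by decide), List.nil_append]
      rw [h1, pvSplitSp_pre rest ['|']]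
      conv_lhs => rw [pvSplitSp_shape rest]
      rw [pvEntMid, pvEntMid]
      simp only [List.singleton_append, hbar]
      simp [add_comm, add_left_comm]
  | case5 c rest pos start hb ents hsp hpair hbarne ih =>
      have hc1 : c ≠ ' ' := fun h => hsp h
      have hc2 : c ≠ '|' := fun h => hbarne h
      rw [ih]
      have h1 : splitSp [] (c :: rest) = splitSp [c] rest := by
        rw [splitSp, if_neg hc1, List.nil_append]
      rw [h1, pvSplitSp_pre rest [c]]
      conv_lhs => rw [pvSplitSp_shape rest]
      rw [pvEntMid, pvEntMid]
      rw [List.singleton_append, remBars_cons_ne c _ hc2]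
      have hm : ('|' ∈ c :: (splitSp [] rest).headI) ↔ ('|' ∈ (splitSp [] rest).headI) := by
        simp [List.mem_cons, Ne.symm hc2]
      by_cases hmem : '|' ∈ (splitSp [] rest).headI
      · simp [hm, hmem, add_comm, add_left_comm]
      · simp [hm, hmem, add_comm, add_left_comm]

-- A's token view equals B's char view
theorem pvEnt_eq (ts : List String) (b : Int) :
    pvEnt b ts = pvEntC b (ts.map String.toList) := by
  induction ts generalizing b with
  | nil => simp [pvEnt, pvEntC]
  | cons t ts ih =>
      have hlen : pvLp t = ((remBars t.toList).length : Int) := by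
        rw [← pvLp_def, PySem.Str.len_eq, PySem.Str.toList_replace]
        have : ("||" : String).toList = ['|', '|'] := rfl
        rw [this]
        have : ("" : String).toList = [] := rfl
        rw [this, pvReplace]
      have hbar : PySem.Chars.isIn ['|'] t.toList = true ↔ '|' ∈ t.toList := by
        rw [PySem.Chars.isIn_iff_infix]
        constructor
        · intro hinf
          obtain ⟨s, u, hsu⟩ := hinf
          rw [← hsu]; simp
        · intro h
          obtain ⟨s, u, hsu⟩ := List.append_of_mem h
          exact ⟨s, u, by rw [hsu]; simp⟩
      by_cases hm : '|' ∈ t.toList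
      · simp [pvEnt, pvEntC, hbar.mpr hm, hm, hlen, ih]
      · have hf : PySem.Chars.isIn ['|'] t.toList = false := by
          cases hx : PySem.Chars.isIn ['|'] t.toList
          · rfl
          · exact absurd (hbar.mp hx) hm
        simp [pvEnt, pvEntC, hf, hm, hlen, ih]

-- the split? bridge for one row
theorem pvSplitRow (row : String) :
    ((PySem.Str.split? row " ").getD []).map String.toList = splitSp [] row.toList := by
  have h := PySem.Str.split?_map row " "
  have hsep : (" " : String).toList = [' '] := rfl
  rw [hsep] at h
  rw [PySem.Chars.split?] at h
  rw [if_neg (by simp)] at h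
  cases hs : PySem.Str.split? row " " with
  | none => rw [hs] at h; simp at h
  | some ts =>
      rw [hs] at h
      simp only [Option.map_some] at h
      have h2 := Option.some.inj h
      simp only [Option.getD_some]
      rw [h2]
      exact pvSplit _

-- per-row equality
theorem pvRow_eq (row : String) :
    pvRowVal row = [("entities", pvScan row.toList 0 0 false [])] := by
  rw [pvRowVal, pvScan_eq, pvEntMid_start, pvEnt_eq, pvSplitRow]
  simp

-- ===== VERDICT (by name: the statement is the Claim_ definition above) =====
theorem split_and_save_to_new_column_spec : Claim_equal_split_and_save_to_new_column := by
  intro df _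
  unfold Spec_split_and_save_to_new_column split_and_save_to_new_column split_and_save_to_new_column_alt
  rw [pvA_outer df PySem.Dict.empty 0 (by
    intro j hj
    simp [PySem.Dict.empty, PySem.Dict.keys] at hj)]
  simp only [PySem.Dict.empty, List.nil_append]
  exact List.map_congr_left fun p _ => by rw [pvRow_eq p.2]
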